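-- pv_equiv track=rewrite | github.com/mashoodalt/weather-studio | actualweather.py | calculate_disease_severity
-- ===== SOURCE A (Python) =====
-- def calculate_disease_severity(weather_data, disease_criteria):
--     # Initialize a dictionary to hold the severity, hours count for consecutive and total hours met for each disease
--     disease_severity = {disease: {'hours_met': 0, 'total_hours_met': 0, 'severity': 0} for disease in disease_criteria}
--
--     # Process each hourly record in the weather data
--     for hour in weather_data:
--         for disease, criteria in disease_criteria.items():
--             # Check if the conditions for this disease are met
--             if (criteria['min_temp'] <= hour['temp'] <= criteria['max_temp'] and
--                 criteria['min_humidity'] <= hour['rh'] <= criteria['max_humidity']):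
--                 # Increment the hour count for this disease
--                 disease_severity[disease]['hours_met'] += 1
--                 disease_severity[disease]['total_hours_met'] += 1
--             else:
--                 # Update severity if conditions were not met and reset hours count
--                 if disease_severity[disease]['hours_met'] > 0:
--                     current_severity = calculate_severity(disease_severity[disease]['hours_met'])
--                     # disease_severity[disease]['total_severity'] = max(disease_severity[disease]['severity'], current_severity)
--                     disease_severity[disease]['hours_met'] = 0
--
--     # Final update for severity after the last hour
--     for disease in disease_criteria:
--         if disease_severity[disease]['hours_met'] > 0:
--             current_severity = calculate_severity(disease_severity[disease]['hours_met'])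
--             disease_severity[disease]['severity'] = max(disease_severity[disease]['severity'], current_severity)
--
--     return disease_severity
--
-- def calculate_severity(hours_met):
--     if hours_met > 3:
--         return int(hours_met) * 2
--     else:
--         return 0
-- ===== SOURCE B (Python) =====
-- def calculate_disease_severity(weather_data, disease_criteria):
--     # Per-disease decomposition: one count pass + one reverse scan for the trailing run,
--     # instead of A's interleaved reset-counter over a shared state dict.
--     result = {}
--     for disease, criteria in disease_criteria.items():
--         total_hours_met = len([hour for hour in weather_data if _met(hour, criteria)])
--         hours_met = 0
--         for hour in reversed(weather_data):
--             if _met(hour, criteria):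
--                 hours_met += 1
--             else:
--                 break
--         result[disease] = {'hours_met': hours_met,
--                            'total_hours_met': total_hours_met,
--                            'severity': calculate_severity(hours_met)}
--     return result
--
-- def _met(hour, criteria):
--     return (criteria['min_temp'] <= hour['temp'] <= criteria['max_temp'] and
--             criteria['min_humidity'] <= hour['rh'] <= criteria['max_humidity'])
--
-- def calculate_severity(hours_met):
--     if hours_met > 3:
--         return int(hours_met) * 2
--     else:
--         return 0
-- ===== Notes on version B (the rewrite author's own statement) =====
-- stated objective: alternative
-- what changed: B loops over diseases in the outer position and, per disease, replaces A's shared mutable state dict with a reset-on-miss counter by one filter pass for total_hours_met plus one reverse scan (stop at first miss) for the trailing run, building each result record directly with severity = calculate_severity(trailing run).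
import Mathlib
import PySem

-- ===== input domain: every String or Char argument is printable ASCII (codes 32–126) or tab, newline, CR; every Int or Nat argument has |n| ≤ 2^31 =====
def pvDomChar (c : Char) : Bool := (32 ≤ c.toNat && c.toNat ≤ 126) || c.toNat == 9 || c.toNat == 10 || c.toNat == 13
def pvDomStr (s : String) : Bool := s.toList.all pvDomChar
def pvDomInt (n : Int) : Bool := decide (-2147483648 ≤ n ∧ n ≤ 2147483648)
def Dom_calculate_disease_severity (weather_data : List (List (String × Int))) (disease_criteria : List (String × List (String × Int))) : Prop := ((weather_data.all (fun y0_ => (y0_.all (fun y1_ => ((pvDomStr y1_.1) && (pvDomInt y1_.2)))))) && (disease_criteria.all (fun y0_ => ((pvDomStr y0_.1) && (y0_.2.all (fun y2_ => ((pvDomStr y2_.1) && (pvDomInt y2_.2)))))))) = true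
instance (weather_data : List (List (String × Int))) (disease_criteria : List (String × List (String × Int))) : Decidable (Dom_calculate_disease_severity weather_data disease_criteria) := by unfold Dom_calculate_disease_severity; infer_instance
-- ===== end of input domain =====

-- B re-decomposes A's interleaved reset-counter over a shared state dict into per-disease
-- passes (a filter count plus a reverse scan for the trailing run); same cost, alternative structure.


-- ===== PORT A =====
-- calculate_severity (module helper, shared by both Pythons)
def pv_calc_severity (hours_met : Int) : Int :=
  if hours_met > 3 then hours_met * 2 else 0

-- the chained comparison of A's inner if (getD's default is never read inside Pre_)
def pvMetA (hour criteria : List (String × Int)) : Bool :=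
  decide ((PySem.Dict.mk criteria).getD "min_temp" 0 ≤ (PySem.Dict.mk hour).getD "temp" 0) &&
  decide ((PySem.Dict.mk hour).getD "temp" 0 ≤ (PySem.Dict.mk criteria).getD "max_temp" 0) &&
  decide ((PySem.Dict.mk criteria).getD "min_humidity" 0 ≤ (PySem.Dict.mk hour).getD "rh" 0) &&
  decide ((PySem.Dict.mk hour).getD "rh" 0 ≤ (PySem.Dict.mk criteria).getD "max_humidity" 0)

-- body of A's inner loop over disease_criteria.items()
def pvStepA (hour : List (String × Int)) (ds : PySem.Dict String (PySem.Dict String Int)) (p : String × List (String × Int)) : PySem.Dict String (PySem.Dict String Int) :=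
  if pvMetA hour p.2 then
    ((ds.modify p.1 (PySem.Dict.mk []) (fun e => e.modify "hours_met" 0 (· + 1))).modify
        p.1 (PySem.Dict.mk []) (fun e => e.modify "total_hours_met" 0 (· + 1)))
  else
    if (ds.getD p.1 (PySem.Dict.mk [])).getD "hours_met" 0 > 0 then
      -- current_severity is computed and discarded in the Python too; only hours_met is reset
      ds.modify p.1 (PySem.Dict.mk []) (fun e => e.insert "hours_met" 0)
    else ds

-- body of A's final loop
def pvStepFin (ds : PySem.Dict String (PySem.Dict String Int)) (p : String × List (String × Int)) : PySem.Dict String (PySem.Dict String Int) :=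
  if (ds.getD p.1 (PySem.Dict.mk [])).getD "hours_met" 0 > 0 then
    ds.modify p.1 (PySem.Dict.mk [])
      (fun e => e.insert "severity" (max (e.getD "severity" 0) (pv_calc_severity (e.getD "hours_met" 0))))
  else ds

def calculate_disease_severity (weather_data : List (List (String × Int))) (disease_criteria : List (String × List (String × Int))) : List (String × List (String × Int)) :=
  let init := disease_criteria.foldl
    (fun d p => d.insert p.1 (PySem.Dict.mk [("hours_met", (0:Int)), ("total_hours_met", 0), ("severity", 0)]))
    (PySem.Dict.mk [])
  let main := weather_data.foldl (fun ds hour => disease_criteria.foldl (pvStepA hour) ds) init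
  let fin := disease_criteria.foldl pvStepFin main
  fin.items.map (fun q => (q.1, q.2.items))

-- ===== PORT B =====
-- _met helper of Source B (same condition as A's inner if)
def pvMetB (hour criteria : List (String × Int)) : Bool :=
  decide ((PySem.Dict.mk criteria).getD "min_temp" 0 ≤ (PySem.Dict.mk hour).getD "temp" 0) &&
  decide ((PySem.Dict.mk hour).getD "temp" 0 ≤ (PySem.Dict.mk criteria).getD "max_temp" 0) &&
  decide ((PySem.Dict.mk criteria).getD "min_humidity" 0 ≤ (PySem.Dict.mk hour).getD "rh" 0) &&
  decide ((PySem.Dict.mk hour).getD "rh" 0 ≤ (PySem.Dict.mk criteria).getD "max_humidity" 0)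

-- Source B's 'for hour in reversed(weather_data): … else break' counting loop
def pvTrailing (criteria : List (String × Int)) : List (List (String × Int)) → Int
  | [] => 0
  | h :: rest => if pvMetB h criteria then 1 + pvTrailing criteria rest else 0

def calculate_disease_severity_alt (weather_data : List (List (String × Int))) (disease_criteria : List (String × List (String × Int))) : List (String × List (String × Int)) :=
  (disease_criteria.foldl
    (fun res p =>
      let total_hours_met : Int := ((weather_data.filter (fun hour => pvMetB hour p.2)).length : Int)
      let hours_met : Int := pvTrailing p.2 weather_data.reverse
      res.insert p.1 (PySem.Dict.mk
        [("hours_met", hours_met), ("total_hours_met", total_hours_met),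
         ("severity", pv_calc_severity hours_met)]))
    (PySem.Dict.mk [])).items.map (fun q => (q.1, q.2.items))

-- ===== PRECONDITION & SPEC =====
-- Pre_ excludes exactly (i) the inputs on which Python raises KeyError: some hour/criteria pair
-- whose chained-comparison evaluation reads a key ('min_temp'/'temp', then 'max_temp', then
-- 'min_humidity'/'rh', then 'max_humidity', in short-circuit order) that is absent — both Pythons
-- evaluate the condition on every (hour, criteria) pair, so they raise on the same inputs; and
-- (ii) association lists with duplicate keys, which cannot arise from a Python dict.
def Pre_calculate_disease_severity (weather_data : List (List (String × Int))) (disease_criteria : List (String × List (String × Int))) : Prop :=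
  (disease_criteria.map (·.1)).Nodup ∧
  (∀ p ∈ disease_criteria, (p.2.map (·.1)).Nodup) ∧
  (∀ h ∈ weather_data, (h.map (·.1)).Nodup) ∧
  (∀ h ∈ weather_data, ∀ p ∈ disease_criteria,
    "min_temp" ∈ p.2.map (·.1) ∧ "temp" ∈ h.map (·.1) ∧
    ((PySem.Dict.mk p.2).getD "min_temp" 0 ≤ (PySem.Dict.mk h).getD "temp" 0 →
      "max_temp" ∈ p.2.map (·.1) ∧
      ((PySem.Dict.mk h).getD "temp" 0 ≤ (PySem.Dict.mk p.2).getD "max_temp" 0 →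
        "min_humidity" ∈ p.2.map (·.1) ∧ "rh" ∈ h.map (·.1) ∧
        ((PySem.Dict.mk p.2).getD "min_humidity" 0 ≤ (PySem.Dict.mk h).getD "rh" 0 →
          "max_humidity" ∈ p.2.map (·.1)))))
instance (weather_data : List (List (String × Int))) (disease_criteria : List (String × List (String × Int))) : Decidable (Pre_calculate_disease_severity weather_data disease_criteria) := by unfold Pre_calculate_disease_severity; infer_instance

def pvWitness_calculate_disease_severity : (List (List (String × Int))) × (List (String × List (String × Int))) :=
  ([[("temp", 20), ("rh", 90)], [("temp", 25), ("rh", 50)]],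
   [("blight", [("min_temp", 10), ("max_temp", 30), ("min_humidity", 80), ("max_humidity", 100)])])

def Spec_calculate_disease_severity (weather_data : List (List (String × Int))) (disease_criteria : List (String × List (String × Int))) (out : List (String × List (String × Int))) : Prop := out = calculate_disease_severity_alt weather_data disease_criteria
instance (weather_data : List (List (String × Int))) (disease_criteria : List (String × List (String × Int))) (out : List (String × List (String × Int))) : Decidable (Spec_calculate_disease_severity weather_data disease_criteria out) := by unfold Spec_calculate_disease_severity; infer_instance

-- ===== CLAIM (what is proved, stated in full; the proofs are below) =====
def Claim_equal_calculate_disease_severity : Prop := ∀ (weather_data : List (List (String × Int))) (disease_criteria : List (String × List (String × Int))), Dom_calculate_disease_severity weather_data disease_criteria → Pre_calculate_disease_severity weather_data disease_criteria → Spec_calculate_disease_severity weather_data disease_criteria (calculate_disease_severity weather_data disease_criteria)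

-- ===== LEMMAS AND PROOFS =====

-- the inner record [hours_met, total_hours_met, severity] A keeps per disease
def pvMkE (h t s : Int) : PySem.Dict String Int :=
  PySem.Dict.mk [("hours_met", h), ("total_hours_met", t), ("severity", s)]

-- per-disease transition of A's main loop, read off one hour
def pvPairStep (c : List (String × Int)) (ht : Int × Int) (hour : List (String × Int)) : Int × Int :=
  if pvMetA hour c then (ht.1 + 1, ht.2 + 1) else (0, ht.2)

theorem pv_map_if_not_mem {ν : Type} (d : String) (w : ν) :
    ∀ l : List (String × ν), d ∉ l.map (·.1) →
      l.map (fun p => if (p.1 == d) then (d, w) else p) = l := by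
  intro l
  induction l with
  | nil => intro _; rfl
  | cons x xs ih =>
    intro h
    simp only [List.map_cons, List.mem_cons] at h
    push Not at h
    rw [List.map_cons, if_neg (by simpa using (Ne.symm h.1)), ih h.2]

theorem pv_find?_mid {ν : Type} (l1 l2 : List (String × ν)) (d : String) (v : ν)
    (h1 : d ∉ l1.map (·.1)) :
    List.find? (fun p => p.1 == d) (l1 ++ (d, v) :: l2) = some (d, v) := by
  rw [List.find?_append, List.find?_eq_none.2, Option.none_or]
  · simp [List.find?]
  · intro p hp hbe
    exact h1 (List.mem_map.2 ⟨p, hp, by simpa using hbe⟩)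

theorem pv_getD_mk_mid {ν : Type} (l1 l2 : List (String × ν)) (d : String) (v dflt : ν)
    (h1 : d ∉ l1.map (·.1)) :
    (PySem.Dict.mk (l1 ++ (d, v) :: l2)).getD d dflt = v := by
  simp [PySem.Dict.getD, PySem.Dict.get?, pv_find?_mid l1 l2 d v h1]

theorem pv_insert_mk_mid {ν : Type} (l1 l2 : List (String × ν)) (d : String) (v w : ν)
    (h1 : d ∉ l1.map (·.1)) (h2 : d ∉ l2.map (·.1)) :
    (PySem.Dict.mk (l1 ++ (d, v) :: l2)).insert d w = PySem.Dict.mk (l1 ++ (d, w) :: l2) := by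
  have hc : (PySem.Dict.mk (l1 ++ (d, v) :: l2)).contains d = true := by
    simp [PySem.Dict.contains]
  rw [PySem.Dict.insert, if_pos hc]
  simp only [List.map_append, List.map_cons]
  rw [pv_map_if_not_mem d w l1 h1, pv_map_if_not_mem d w l2 h2]
  simp

theorem pv_modify_mk_mid {ν : Type} (l1 l2 : List (String × ν)) (d : String) (v dflt : ν)
    (f : ν → ν) (h1 : d ∉ l1.map (·.1)) (h2 : d ∉ l2.map (·.1)) :
    (PySem.Dict.mk (l1 ++ (d, v) :: l2)).modify d dflt f = PySem.Dict.mk (l1 ++ (d, f v) :: l2) := by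
  rw [PySem.Dict.modify, pv_getD_mk_mid l1 l2 d v dflt h1, pv_insert_mk_mid l1 l2 d v (f v) h1 h2]

-- a fold of per-key steps over the key list acts pointwise on a state keyed exactly by that list
theorem pvFoldMid
    (step : PySem.Dict String (PySem.Dict String Int) → (String × List (String × Int)) → PySem.Dict String (PySem.Dict String Int))
    (G : (String × List (String × Int)) → PySem.Dict String Int → PySem.Dict String Int)
    (hstep : ∀ (l1 l2 : List (String × PySem.Dict String Int)) (p : String × List (String × Int)) (v : PySem.Dict String Int),
      p.1 ∉ l1.map (·.1) → p.1 ∉ l2.map (·.1) →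
      step (PySem.Dict.mk (l1 ++ (p.1, v) :: l2)) p = PySem.Dict.mk (l1 ++ (p.1, G p v) :: l2)) :
    ∀ (todo : List (String × List (String × Int))) (done : List (String × PySem.Dict String Int))
      (F : (String × List (String × Int)) → PySem.Dict String Int),
      (done.map (·.1) ++ todo.map (·.1)).Nodup →
      todo.foldl step (PySem.Dict.mk (done ++ todo.map (fun p => (p.1, F p)))) =
        PySem.Dict.mk (done ++ todo.map (fun p => (p.1, G p (F p)))) := by
  intro todo
  induction todo with
  | nil => intro done F _; rfl
  | cons p rest ih =>
    intro done F hnd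
    rw [List.map_cons] at hnd
    obtain ⟨nd1, nd2, disj⟩ := List.nodup_append.mp hnd
    have h1 : p.1 ∉ done.map (·.1) := by
      intro hm; exact disj p.1 hm p.1 List.mem_cons_self rfl
    have h2 : p.1 ∉ rest.map (·.1) := (List.nodup_cons.mp nd2).1
    have hkeysF : (rest.map (fun q => (q.1, F q))).map (·.1) = rest.map (·.1) := by
      simp [List.map_map, Function.comp]
    rw [List.foldl_cons, List.map_cons,
        hstep done (rest.map (fun q => (q.1, F q))) p (F p) h1 (by rw [hkeysF]; exact h2),
        List.append_cons done (p.1, G p (F p)) (rest.map (fun q => (q.1, F q))),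
        ih (done ++ [(p.1, G p (F p))]) F
          (by
            rw [List.map_append, List.append_assoc]
            simpa using hnd),
        List.map_cons, List.append_cons, List.append_assoc]
    simp

theorem pvStepA_mid (hour : List (String × Int)) (l1 l2 : List (String × PySem.Dict String Int))
    (p : String × List (String × Int)) (v : PySem.Dict String Int)
    (h1 : p.1 ∉ l1.map (·.1)) (h2 : p.1 ∉ l2.map (·.1)) :
    pvStepA hour (PySem.Dict.mk (l1 ++ (p.1, v) :: l2)) p =
      PySem.Dict.mk (l1 ++ (p.1,
        if pvMetA hour p.2 then
          (v.modify "hours_met" 0 (· + 1)).modify "total_hours_met" 0 (· + 1)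
        else if v.getD "hours_met" 0 > 0 then v.insert "hours_met" 0 else v) :: l2) := by
  unfold pvStepA
  by_cases hm : pvMetA hour p.2
  · rw [if_pos hm, if_pos hm,
        pv_modify_mk_mid l1 l2 p.1 v (PySem.Dict.mk []) _ h1 h2,
        pv_modify_mk_mid l1 l2 p.1 _ (PySem.Dict.mk []) _ h1 h2]
  · rw [if_neg hm, if_neg hm, pv_getD_mk_mid l1 l2 p.1 v (PySem.Dict.mk []) h1]
    by_cases hg : v.getD "hours_met" 0 > 0
    · rw [if_pos hg, if_pos hg, pv_modify_mk_mid l1 l2 p.1 v (PySem.Dict.mk []) _ h1 h2]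
    · rw [if_neg hg, if_neg hg]

theorem pvStepFin_mid (l1 l2 : List (String × PySem.Dict String Int))
    (p : String × List (String × Int)) (v : PySem.Dict String Int)
    (h1 : p.1 ∉ l1.map (·.1)) (h2 : p.1 ∉ l2.map (·.1)) :
    pvStepFin (PySem.Dict.mk (l1 ++ (p.1, v) :: l2)) p =
      PySem.Dict.mk (l1 ++ (p.1,
        if v.getD "hours_met" 0 > 0 then
          v.insert "severity" (max (v.getD "severity" 0) (pv_calc_severity (v.getD "hours_met" 0)))
        else v) :: l2) := by
  unfold pvStepFin
  rw [pv_getD_mk_mid l1 l2 p.1 v (PySem.Dict.mk []) h1]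
  by_cases hg : v.getD "hours_met" 0 > 0
  · rw [if_pos hg, if_pos hg, pv_modify_mk_mid l1 l2 p.1 v (PySem.Dict.mk []) _ h1 h2]
  · rw [if_neg hg, if_neg hg]

theorem pv_calc_severity_nonneg (a : Int) : 0 ≤ pv_calc_severity a := by
  unfold pv_calc_severity; split <;> omega

theorem pvEntryA (hour : List (String × Int)) (p : String × List (String × Int)) (a b : Int)
    (ha : 0 ≤ a) :
    (if pvMetA hour p.2 then
        ((pvMkE a b 0).modify "hours_met" 0 (· + 1)).modify "total_hours_met" 0 (· + 1)
      else if (pvMkE a b 0).getD "hours_met" 0 > 0 then (pvMkE a b 0).insert "hours_met" 0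
      else pvMkE a b 0) =
      pvMkE (pvPairStep p.2 (a, b) hour).1 (pvPairStep p.2 (a, b) hour).2 0 := by
  unfold pvPairStep
  by_cases hm : pvMetA hour p.2
  · simp only [hm, if_true]; rfl
  · simp only [hm, if_false, Bool.false_eq_true]
    have hget : (pvMkE a b 0).getD "hours_met" 0 = a := rfl
    rw [hget]
    by_cases hg : a > 0
    · rw [if_pos hg]; rfl
    · rw [if_neg hg]
      have : a = 0 := by omega
      subst this; rfl

theorem pvEntryFin (a b : Int) (ha : 0 ≤ a) :
    (if (pvMkE a b 0).getD "hours_met" 0 > 0 then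
        (pvMkE a b 0).insert "severity"
          (max ((pvMkE a b 0).getD "severity" 0) (pv_calc_severity ((pvMkE a b 0).getD "hours_met" 0)))
      else pvMkE a b 0) = pvMkE a b (pv_calc_severity a) := by
  have hget : (pvMkE a b 0).getD "hours_met" 0 = a := rfl
  have hsev : (pvMkE a b 0).getD "severity" 0 = 0 := rfl
  rw [hget, hsev]
  by_cases hg : a > 0
  · rw [if_pos hg, max_eq_right (pv_calc_severity_nonneg a)]; rfl
  · rw [if_neg hg]
    have : a = 0 := by omega
    subst this; rfl

theorem pvPairStep_fst_nonneg (c : List (String × Int)) (ht : Int × Int) (hour : List (String × Int))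
    (h : 0 ≤ ht.1) : 0 ≤ (pvPairStep c ht hour).1 := by
  unfold pvPairStep; split <;> simp <;> omega

-- A's main loop, characterised per disease
theorem pvMainLoop (dc : List (String × List (String × Int))) (hnd : (dc.map (·.1)).Nodup) :
    ∀ (wd : List (List (String × Int))) (P : (String × List (String × Int)) → Int × Int),
      (∀ p, 0 ≤ (P p).1) →
      wd.foldl (fun ds hour => dc.foldl (pvStepA hour) ds)
          (PySem.Dict.mk (dc.map (fun p => (p.1, pvMkE (P p).1 (P p).2 0)))) =
        PySem.Dict.mk (dc.map (fun p =>
          (p.1, pvMkE (wd.foldl (pvPairStep p.2) (P p)).1 (wd.foldl (pvPairStep p.2) (P p)).2 0))) := by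
  intro wd
  induction wd with
  | nil => intro P _; rfl
  | cons hour rest ih =>
    intro P hP
    rw [List.foldl_cons]
    have hone := pvFoldMid (pvStepA hour)
      (fun p v =>
        if pvMetA hour p.2 then
          (v.modify "hours_met" 0 (· + 1)).modify "total_hours_met" 0 (· + 1)
        else if v.getD "hours_met" 0 > 0 then v.insert "hours_met" 0 else v)
      (fun l1 l2 p v => pvStepA_mid hour l1 l2 p v)
      dc [] (fun p => pvMkE (P p).1 (P p).2 0) (by simpa using hnd)
    simp only [List.nil_append] at hone
    rw [hone]
    have hent : (dc.map (fun p => (p.1,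
        (fun p v =>
          if pvMetA hour p.2 then
            (v.modify "hours_met" 0 (· + 1)).modify "total_hours_met" 0 (· + 1)
          else if v.getD "hours_met" 0 > 0 then v.insert "hours_met" 0 else v)
          p (pvMkE (P p).1 (P p).2 0)))) =
        dc.map (fun p => (p.1,
          pvMkE (pvPairStep p.2 (P p) hour).1 (pvPairStep p.2 (P p) hour).2 0)) := by
      apply List.map_congr_left
      intro p _
      have := pvEntryA hour p (P p).1 (P p).2 (hP p)
      simpa using this
    rw [hent, ih (fun p => pvPairStep p.2 (P p) hour)
      (fun p => pvPairStep_fst_nonneg p.2 (P p) hour (hP p))]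
    simp only [List.foldl_cons]

theorem pv_snd_fold (c : List (String × Int)) :
    ∀ (wd : List (List (String × Int))) (ht : Int × Int),
      (wd.foldl (pvPairStep c) ht).2 = ht.2 + ((wd.filter (fun h => pvMetA h c)).length : Int) := by
  intro wd
  induction wd with
  | nil => intro ht; simp
  | cons x xs ih =>
    intro ht
    rw [List.foldl_cons, ih]
    unfold pvPairStep
    by_cases hm : pvMetA x c <;> simp [hm] <;> ring

theorem pv_fst_fold (c : List (String × Int)) :
    ∀ (wd : List (List (String × Int))) (ht : Int × Int),
      (wd.foldl (pvPairStep c) ht).1 =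
        wd.foldl (fun h hour => if pvMetA hour c then h + 1 else 0) ht.1 := by
  intro wd
  induction wd with
  | nil => intro ht; rfl
  | cons x xs ih =>
    intro ht
    rw [List.foldl_cons, List.foldl_cons, ih]
    unfold pvPairStep
    by_cases hm : pvMetA x c <;> simp [hm]

theorem pv_run_eq_trailing (c : List (String × Int)) (wd : List (List (String × Int))) :
    wd.foldl (fun h hour => if pvMetA hour c then h + 1 else 0) (0 : Int) =
      pvTrailing c wd.reverse := by
  induction wd using List.reverseRecOn with
  | nil => rfl
  | append_singleton l x ih =>
    rw [List.foldl_append, List.foldl_cons, List.foldl_nil, List.reverse_append]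
    simp only [List.reverse_cons, List.reverse_nil, List.nil_append, List.singleton_append]
    rw [pvTrailing]
    have hab : pvMetB x c = pvMetA x c := rfl
    rw [hab]
    by_cases hm : pvMetA x c
    · rw [if_pos hm, if_pos hm, ← ih]; ring
    · rw [if_neg hm, if_neg hm]

-- ===== VERDICT (by name: the statement is the Claim_ definition above) =====
theorem pv_fold_fst_nonneg (c : List (String × Int)) :
    ∀ (wd : List (List (String × Int))) (ht : Int × Int),
      0 ≤ ht.1 → 0 ≤ (wd.foldl (pvPairStep c) ht).1 := by
  intro wd
  induction wd with
  | nil => intro ht h; exact h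
  | cons x xs ih =>
    intro ht h
    rw [List.foldl_cons]
    exact ih (pvPairStep c ht x) (pvPairStep_fst_nonneg c ht x h)

theorem calculate_disease_severity_spec : Claim_equal_calculate_disease_severity := by
  intro wd dc _ hpre
  obtain ⟨hnd, -, -, -⟩ := hpre
  unfold Spec_calculate_disease_severity
  unfold calculate_disease_severity calculate_disease_severity_alt
  simp only []
  -- A's init dict is the key list of dc paired with all-zero records
  have hinit : dc.foldl
      (fun d p => d.insert p.1 (PySem.Dict.mk [("hours_met", (0:Int)), ("total_hours_met", 0), ("severity", 0)]))
      (PySem.Dict.mk []) = PySem.Dict.mk (dc.map (fun p => (p.1, pvMkE 0 0 0))) := by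
    apply PySem.Dict.ext
    rw [PySem.Dict.items_foldl_insert_fresh dc (fun p => p.1)
        (fun _ => PySem.Dict.mk [("hours_met", (0:Int)), ("total_hours_met", 0), ("severity", 0)]) (PySem.Dict.mk [])
        (fun a _ => by simp [PySem.Dict.contains]) (by simpa using hnd)]
    rfl
  have hmain := pvMainLoop dc hnd wd (fun _ => ((0:Int), (0:Int))) (fun _ => le_refl 0)
  rw [hinit, hmain]
  -- A's final loop writes the severity field
  have hfin := pvFoldMid pvStepFin
      (fun p v =>
        if v.getD "hours_met" 0 > 0 then
          v.insert "severity" (max (v.getD "severity" 0) (pv_calc_severity (v.getD "hours_met" 0)))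
        else v)
      (fun l1 l2 p v => pvStepFin_mid l1 l2 p v)
      dc []
      (fun p => pvMkE (wd.foldl (pvPairStep p.2) (0, 0)).1 (wd.foldl (pvPairStep p.2) (0, 0)).2 0)
      (by simpa using hnd)
  simp only [List.nil_append] at hfin
  rw [hfin]
  -- B's result dict is the key list of dc paired with its records
  have hb : (dc.foldl
      (fun res p =>
        let total_hours_met : Int := ((wd.filter (fun hour => pvMetB hour p.2)).length : Int)
        let hours_met : Int := pvTrailing p.2 wd.reverse
        res.insert p.1 (PySem.Dict.mk
          [("hours_met", hours_met), ("total_hours_met", total_hours_met),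
           ("severity", pv_calc_severity hours_met)]))
      (PySem.Dict.mk [])).items =
      dc.map (fun p => (p.1, PySem.Dict.mk
        [("hours_met", pvTrailing p.2 wd.reverse),
         ("total_hours_met", ((wd.filter (fun hour => pvMetB hour p.2)).length : Int)),
         ("severity", pv_calc_severity (pvTrailing p.2 wd.reverse))])) := by
    rw [PySem.Dict.items_foldl_insert_fresh dc (fun p => p.1)
        (fun p => PySem.Dict.mk
          [("hours_met", pvTrailing p.2 wd.reverse),
           ("total_hours_met", ((wd.filter (fun hour => pvMetB hour p.2)).length : Int)),
           ("severity", pv_calc_severity (pvTrailing p.2 wd.reverse))])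
        (PySem.Dict.mk [])
        (fun a _ => by simp [PySem.Dict.contains]) (by simpa using hnd)]
    rfl
  rw [hb]
  simp only [List.map_map]
  apply List.map_congr_left
  intro p _
  simp only [Function.comp]
  have ha : 0 ≤ (wd.foldl (pvPairStep p.2) ((0:Int), (0:Int))).1 :=
    pv_fold_fst_nonneg p.2 wd (0, 0) (le_refl 0)
  rw [pvEntryFin (wd.foldl (pvPairStep p.2) (0, 0)).1 (wd.foldl (pvPairStep p.2) (0, 0)).2 ha]
  have hfst : (wd.foldl (pvPairStep p.2) ((0:Int), (0:Int))).1 = pvTrailing p.2 wd.reverse := by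
    rw [pv_fst_fold p.2 wd (0, 0)]
    exact pv_run_eq_trailing p.2 wd
  have hsnd : (wd.foldl (pvPairStep p.2) ((0:Int), (0:Int))).2 =
      ((wd.filter (fun h => pvMetA h p.2)).length : Int) := by
    rw [pv_snd_fold p.2 wd (0, 0)]
    ring
  have hAB : (fun h => pvMetA h p.2) = (fun h => pvMetB h p.2) := rfl
  rw [hfst, hsnd, hAB]
  rfl
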